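-- pv_equiv track=rewrite | github.com/romandlcourcerccf/algo_trainning | training_80/week_1/8_1_F/stochastic.py | calc_dist
-- ===== SOURCE A (Python) =====
-- def calc_dist(table):
--     row_maxs = []
--     col_mins = []
--
--     for r in table:
--         row_maxs.append(sum(r))
--
--     for c in range(len(table[0])):
--         col = []
--         for r in range(len(table)):
--             col.append(table[r][c])
--
--         col_mins.append(sum(col))
--
--     return abs(max(row_maxs) - min(col_mins))
-- ===== SOURCE B (Python) =====
-- def calc_dist(table):
--     ncols = len(table[0])
--     row_sums = []
--     col_sums = [0] * ncols
--     for row in table: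
--         row_sums.append(sum(row))
--         col_sums = [s + x for s, x in zip(col_sums, row)]
--     return abs(max(row_sums) - min(col_sums))
-- ===== Notes on version B (the rewrite author's own statement) =====
-- stated objective: alternative
-- what changed: Replaces A's second column-major nested scan (materialising each column as a list before summing it) with a single row-major pass that keeps a running column-sum accumulator updated by zip, alongside the row sums.
import Mathlib
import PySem

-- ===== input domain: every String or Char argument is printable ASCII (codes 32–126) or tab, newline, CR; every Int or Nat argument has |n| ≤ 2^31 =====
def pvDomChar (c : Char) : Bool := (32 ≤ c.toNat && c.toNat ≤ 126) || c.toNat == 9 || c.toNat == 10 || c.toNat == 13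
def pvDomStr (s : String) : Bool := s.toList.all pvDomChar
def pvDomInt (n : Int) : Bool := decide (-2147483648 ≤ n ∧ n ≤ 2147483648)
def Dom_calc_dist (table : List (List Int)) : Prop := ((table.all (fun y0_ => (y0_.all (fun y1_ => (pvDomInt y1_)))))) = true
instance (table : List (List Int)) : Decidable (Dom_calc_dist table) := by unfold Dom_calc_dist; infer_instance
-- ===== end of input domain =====

-- B makes a single row-major pass keeping a running column-sum accumulator (zip) instead of
-- A's second column-major nested scan that materialises every column; same cost, different traversal.

-- ===== PORT A =====
def calc_dist (table : List (List Int)) : Int :=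
  let row_maxs := table.foldl (fun acc r => acc ++ [r.sum]) []
  let col_mins := (PySem.List.pyRange 0 (((PySem.List.pyGet? table 0).getD []).length : Int) 1).foldl
    (fun acc c =>
      let col := (PySem.List.pyRange 0 (table.length : Int) 1).foldl
        (fun colAcc r => colAcc ++ [PySem.List.pyGetD (PySem.List.pyGetD table r []) c 0]) []
      acc ++ [col.sum]) []
  |((PySem.List.max? row_maxs (fun x => x)).getD 0) - ((PySem.List.min? col_mins (fun x => x)).getD 0)|

-- ===== PORT B =====
def calc_dist_alt (table : List (List Int)) : Int :=
  let ncols := ((PySem.List.pyGet? table 0).getD []).length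
  let st := table.foldl
    (fun (p : List Int × List Int) row => (p.1 ++ [row.sum], List.zipWith (· + ·) p.2 row))
    (([] : List Int), List.replicate ncols (0 : Int))
  |((PySem.List.max? st.1 (fun x => x)).getD 0) - ((PySem.List.min? st.2 (fun x => x)).getD 0)|

-- ===== PRECONDITION & SPEC =====
-- Pre_ excludes exactly the inputs where A raises: the empty table (IndexError on table[0]),
-- zero columns (ValueError: min of empty), and ragged rows shorter than row 0 (IndexError).
def Pre_calc_dist (table : List (List Int)) : Prop :=
  table ≠ [] ∧ 0 < table.headI.length ∧ ∀ r ∈ table, table.headI.length ≤ r.length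
instance (table : List (List Int)) : Decidable (Pre_calc_dist table) := by
  unfold Pre_calc_dist; infer_instance

def pvWitness_calc_dist : List (List Int) := [[1, 2], [3, 4]]

def Spec_calc_dist (table : List (List Int)) (out : Int) : Prop := out = calc_dist_alt table
instance (table : List (List Int)) (out : Int) : Decidable (Spec_calc_dist table out) := by
  unfold Spec_calc_dist; infer_instance

-- ===== CLAIM (what is proved, stated in full; the proofs are below) =====
def Claim_equal_calc_dist : Prop :=
  ∀ (table : List (List Int)), Dom_calc_dist table → Pre_calc_dist table →
    Spec_calc_dist table (calc_dist table)

-- ===== LEMMAS AND PROOFS =====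

-- B's pair-state fold splits into the two independent folds.
theorem pv_fold_split (table : List (List Int)) (a b : List Int) :
    table.foldl (fun (p : List Int × List Int) row =>
        (p.1 ++ [row.sum], List.zipWith (· + ·) p.2 row)) (a, b)
      = (table.foldl (fun acc row => acc ++ [row.sum]) a,
         table.foldl (fun cs row => List.zipWith (· + ·) cs row) b) := by
  induction table generalizing a b with
  | nil => rfl
  | cons r t ih => simp [List.foldl, ih]

-- characterisation of B's running column-sum accumulator
theorem pv_colfold (table : List (List Int)) (acc : List Int)
    (h : ∀ r ∈ table, acc.length ≤ r.length) :
    table.foldl (fun cs row => List.zipWith (· + ·) cs row) acc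
      = (List.range acc.length).map
          (fun k => acc.getD k 0 + (table.map (fun row => row.getD k 0)).sum) := by
  induction table generalizing acc with
  | nil =>
      simp only [List.foldl, List.map_nil, List.sum_nil, add_zero]
      apply List.ext_getElem
      · simp
      · intro i h1 h2
        simp only [List.getElem_map, List.getElem_range, List.getD_eq_getElem?_getD]
        rw [List.getElem?_eq_getElem h1]
        rfl
  | cons r t ih =>
      have hr : acc.length ≤ r.length := h r (by simp)
      have hlen : (List.zipWith (· + ·) acc r).length = acc.length := by
        simp [List.length_zipWith]; omega
      rw [List.foldl_cons, ih _ (by intro x hx; rw [hlen]; exact h x (by simp [hx]))]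
      rw [hlen]
      apply List.map_congr_left
      intro k hk
      simp only [List.mem_range] at hk
      have : (List.zipWith (· + ·) acc r).getD k 0 = acc.getD k 0 + r.getD k 0 := by
        rw [List.getD_eq_getElem _ _ (by omega), List.getD_eq_getElem _ _ (by omega),
            List.getD_eq_getElem _ _ (by omega), List.getElem_zipWith]
      rw [this]
      simp [add_assoc]

-- ===== VERDICT =====
theorem calc_dist_spec : Claim_equal_calc_dist := by
  intro table _ hpre
  obtain ⟨hne, hpos, hlen⟩ := hpre
  obtain ⟨r0, rest, rfl⟩ : ∃ r0 rest, table = r0 :: rest := by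
    cases table with
    | nil => exact absurd rfl hne
    | cons a b => exact ⟨a, b, rfl⟩
  simp only [List.headI] at hpos hlen
  simp only [Spec_calc_dist, calc_dist, calc_dist_alt]
  rw [pv_fold_split]
  simp only [PySem.List.pyGet?_zero_cons, Option.getD_some]
  -- columns: rewrite A's nested loops to the same map-of-sums form as B's accumulator
  have hA :
      (PySem.List.pyRange 0 (r0.length : Int) 1).foldl
        (fun acc c =>
          acc ++ [((PySem.List.pyRange 0 ((r0 :: rest).length : Int) 1).foldl
            (fun colAcc r => colAcc ++ [PySem.List.pyGetD (PySem.List.pyGetD (r0 :: rest) r []) c 0]) []).sum]) []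
      = (List.range r0.length).map
          (fun k => (List.replicate r0.length (0 : Int)).getD k 0
            + ((r0 :: rest).map (fun row => row.getD k 0)).sum) := by
    have hinner : ∀ c : Int,
        (PySem.List.pyRange 0 (((r0 :: rest).length : Int)) 1).foldl
          (fun colAcc r => colAcc ++ [PySem.List.pyGetD (PySem.List.pyGetD (r0 :: rest) r []) c 0]) []
        = (r0 :: rest).map (fun row => PySem.List.pyGetD row c 0) := by
      intro c
      rw [PySem.List.foldl_pyRange_zero_pyGetD' (r0 :: rest) []
            (fun colAcc row => colAcc ++ [PySem.List.pyGetD row c 0]) []]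
      rw [PySem.List.foldl_append_singleton_eq_map]
      simp
    rw [PySem.List.foldl_append_singleton_eq_map]
    simp only [hinner]
    rw [PySem.List.pyRange_zero_nat, List.map_map]
    apply List.map_congr_left
    intro k hk
    simp only [List.mem_range] at hk
    simp [Function.comp, PySem.List.pyGetD_natCast]
  rw [hA]
  rw [pv_colfold (r0 :: rest) (List.replicate r0.length 0)
        (by intro r hr; simpa using hlen r hr)]
  simp
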